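-- pv_equiv track=rewrite | github.com/pypi-data/pypi-mirror-348 | packages/pybigue/pybigue-1.0.0.tar.gz/pybigue-1.0.0/pybigue/kernels/clusters.py | find_beginning_periodic
-- ===== SOURCE A (Python) =====
-- def find_beginning_periodic(sequence, subseq):
--     """Works if subseq has contiguous positions in sequence."""
--     beginning = 0
--     last_value_in_subseq = sequence[0] in subseq
--     for i, value in reversed(list(enumerate(sequence))):
--         if last_value_in_subseq and value not in subseq:
--             beginning = i + 1
--             break
--         last_value_in_subseq = value in subseq
--     return beginning
-- ===== SOURCE B (Python) =====
-- def find_beginning_periodic(sequence, subseq):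
--     """Works if subseq has contiguous positions in sequence."""
--     n = len(sequence)
--     members = set(subseq)
--     member = [v in members for v in sequence]
--     candidates = [i + 1 for i in range(n)
--                   if member[(i + 1) % n] and not member[i]]
--     return max(candidates) if candidates else 0
-- ===== Notes on version B (the rewrite author's own statement) =====
-- stated objective: alternative
-- what changed: A's reverse scan with a running last-in-subseq flag and an early break is replaced by building a membership table once, collecting all cyclic block-boundary indices in a forward comprehension, and returning their maximum (0 if none).
import Mathlib
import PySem

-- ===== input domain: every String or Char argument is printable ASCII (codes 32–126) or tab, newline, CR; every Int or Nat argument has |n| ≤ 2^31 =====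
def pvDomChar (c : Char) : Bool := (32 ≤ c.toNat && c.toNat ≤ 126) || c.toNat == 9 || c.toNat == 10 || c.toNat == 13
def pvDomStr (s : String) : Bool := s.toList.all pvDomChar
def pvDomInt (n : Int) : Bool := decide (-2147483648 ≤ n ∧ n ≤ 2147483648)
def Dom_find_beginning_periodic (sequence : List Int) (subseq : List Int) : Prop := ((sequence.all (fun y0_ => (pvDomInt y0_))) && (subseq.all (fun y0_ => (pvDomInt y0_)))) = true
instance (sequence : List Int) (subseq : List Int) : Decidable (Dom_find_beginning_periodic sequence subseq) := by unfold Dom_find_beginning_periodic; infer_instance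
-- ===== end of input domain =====

-- B replaces A's reverse scan with a running flag and early break by a membership
-- table plus a forward comprehension of all block boundaries, returning their max
-- (objective: alternative decomposition; same asymptotic cost).

-- ===== PORT A =====
-- the for-loop with break, over reversed(list(enumerate(sequence))); state = (beginning, last_value_in_subseq)
def fbpLoop (subseq : List Int) : List (Int × Int) → Int → Bool → Int
  | [], beginning, _ => beginning
  | (i, value) :: rest, beginning, last =>
    if last && !(subseq.contains value) then i + 1
    else fbpLoop subseq rest beginning (subseq.contains value)

def find_beginning_periodic (sequence : List Int) (subseq : List Int) : Int :=
  match PySem.List.pyGet? sequence 0 with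
  | none => 0  -- sequence[0] raises IndexError here; excluded by Pre_
  | some v0 => fbpLoop subseq (PySem.List.enumerate sequence).reverse 0 (subseq.contains v0)

-- ===== PORT B =====
def find_beginning_periodic_alt (sequence : List Int) (subseq : List Int) : Int :=
  let n := sequence.length
  let members := PySem.Set.ofList subseq
  let member := sequence.map (fun v => members.contains v)
  let candidates := (List.range n).filterMap (fun i =>
    if member.getD ((i + 1) % n) false && !(member.getD i false) then some ((i : Int) + 1) else none)
  match PySem.List.max? candidates (fun x => x) with
  | some m => m
  | none => 0

-- ===== PRECONDITION & SPEC =====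
-- A raises IndexError (sequence[0]) exactly on the empty sequence; Pre_ excludes it.
def Pre_find_beginning_periodic (sequence : List Int) (subseq : List Int) : Prop := sequence ≠ []
instance (sequence : List Int) (subseq : List Int) : Decidable (Pre_find_beginning_periodic sequence subseq) := by unfold Pre_find_beginning_periodic; infer_instance
def pvWitness_find_beginning_periodic : List Int × List Int := ([5, 1, 2, 5, 5], [1, 2])

def Spec_find_beginning_periodic (sequence : List Int) (subseq : List Int) (out : Int) : Prop := out = find_beginning_periodic_alt sequence subseq
instance (sequence : List Int) (subseq : List Int) (out : Int) : Decidable (Spec_find_beginning_periodic sequence subseq out) := by unfold Spec_find_beginning_periodic; infer_instance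

-- ===== CLAIM (what is proved, stated in full; the proofs are below) =====
def Claim_equal_find_beginning_periodic : Prop := ∀ (sequence : List Int) (subseq : List Int), Dom_find_beginning_periodic sequence subseq → Pre_find_beginning_periodic sequence subseq → Spec_find_beginning_periodic sequence subseq (find_beginning_periodic sequence subseq)

-- ===== LEMMAS AND PROOFS =====

-- common reference function: scan indices k-1, …, 0; return i+1 for the first i with c i, else 0
def findDown (c : Nat → Bool) : Nat → Int
  | 0 => 0
  | k + 1 => if c k then (k : Int) + 1 else findDown c k

def bList (c : Nat → Bool) (k : Nat) : List Int :=
  (List.range k).filterMap (fun i => if c i then some ((i : Int) + 1) else none)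

theorem bList_le (c : Nat → Bool) (k : Nat) (x : Int) (hx : x ∈ bList c k) : x ≤ (k : Int) := by
  simp only [bList, List.mem_filterMap, List.mem_range] at hx
  obtain ⟨i, hi, hif⟩ := hx
  by_cases h : c i = true <;> simp [h] at hif
  omega

theorem foldl_max_le (m : Int) (t : List Int) : ∀ x : Int, x ≤ m → (∀ y ∈ t, y ≤ m) → t.foldl max x ≤ m := by
  induction t with
  | nil => intro x hx _; simpa using hx
  | cons y t ih =>
    intro x hx hall
    simp only [List.foldl_cons]
    exact ih _ (max_le hx (hall y (by simp))) (fun z hz => hall z (by simp [hz]))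

theorem max?_append_last (l : List Int) (m : Int) (h : ∀ x ∈ l, x ≤ m) :
    PySem.List.max? (l ++ [m]) (fun x => x) = some m := by
  cases l with
  | nil => simp [PySem.List.max?_id_cons]
  | cons x t =>
    rw [List.cons_append, PySem.List.max?_id_cons]
    have : (t ++ [m]).foldl max x = max (t.foldl max x) m := by
      rw [List.foldl_append]; simp
    rw [this, max_eq_right (foldl_max_le m t x (h x (by simp)) (fun y hy => h y (by simp [hy])))]

theorem bMax (c : Nat → Bool) (k : Nat) :
    (match PySem.List.max? (bList c k) (fun x => x) with | some m => m | none => 0) = findDown c k := by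
  induction k with
  | zero => simp [bList, findDown, PySem.List.max?]
  | succ k ih =>
    have hsplit : bList c (k+1) = bList c k ++ (if c k then [(k : Int) + 1] else []) := by
      simp [bList, List.range_succ, List.filterMap_append]
      by_cases h : c k = true <;> simp [h]
    rw [hsplit, findDown]
    by_cases h : c k = true
    · have := max?_append_last (bList c k) ((k : Int) + 1)
        (fun x hx => le_trans (bList_le c k x hx) (by omega))
      simp [h, this]
    · simp [h, ih]

theorem aLoop_take (subseq s : List Int) (mem : Nat → Bool)
    (hmem : ∀ (k : Nat) (h : k < s.length), mem k = subseq.contains s[k]) :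
    ∀ k, k ≤ s.length →
    fbpLoop subseq ((PySem.List.enumerate (s.take k)).reverse) 0 (mem (k % s.length)) =
    findDown (fun i => mem ((i+1) % s.length) && !mem i) k := by
  intro k
  induction k with
  | zero => intro _; simp [fbpLoop, findDown]
  | succ k ih =>
    intro hk
    have hklt : k < s.length := by omega
    have htake : s.take (k+1) = s.take k ++ [s[k]] := by
      rw [List.take_add_one]; simp [List.getElem?_eq_getElem hklt]
    rw [htake, PySem.List.enumerate_append]
    have hlen : (s.take k).length = k := by simp [List.length_take]; omega
    rw [hlen]
    have hsingle : PySem.List.enumerate [s[k]] (0 + (k : Int)) = [((k : Int), s[k])] := by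
      simp [PySem.List.enumerate_cons, PySem.List.enumerate_nil]
    rw [hsingle, List.reverse_append]
    simp only [List.reverse_singleton, List.singleton_append]
    rw [fbpLoop, findDown, hmem k hklt]
    split_ifs with hcond
    · rfl
    · rw [show subseq.contains s[k] = mem (k % s.length) from by rw [Nat.mod_eq_of_lt hklt, hmem k hklt]]
      exact ih (by omega)

theorem alt_eq_findDown (s subseq : List Int) :
    find_beginning_periodic_alt s subseq =
    (match PySem.List.max? (bList (fun i => (s.map fun v => (PySem.Set.ofList subseq).contains v).getD ((i + 1) % s.length) false && !((s.map fun v => (PySem.Set.ofList subseq).contains v).getD i false)) s.length) (fun x => x) with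
     | some m => m | none => 0) := rfl

theorem mem_getD_eq (s subseq : List Int) (k : Nat) (h : k < s.length) :
    (s.map fun v => (PySem.Set.ofList subseq).contains v).getD k false = subseq.contains s[k] := by
  simp [List.getD, List.getElem?_map, List.getElem?_eq_getElem h]

theorem find_beginning_periodic_spec : Claim_equal_find_beginning_periodic := by
  intro s subseq _ hpre
  unfold Spec_find_beginning_periodic
  have hn : 0 < s.length := List.length_pos_iff.mpr hpre
  have hA : find_beginning_periodic s subseq =
      findDown (fun i => (s.map fun v => (PySem.Set.ofList subseq).contains v).getD ((i + 1) % s.length) false && !((s.map fun v => (PySem.Set.ofList subseq).contains v).getD i false)) s.length := by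
    rw [find_beginning_periodic]
    have h0 : PySem.List.pyGet? s 0 = some s[0] := by
      have h0' : PySem.List.pyGet? s ((0 : Nat) : Int) = s[(0 : Nat)]? := PySem.List.pyGet?_natCast s 0
      simpa [List.getElem?_eq_getElem hn] using h0' 
    rw [h0]
    have hal := aLoop_take subseq s
      (fun j => (s.map fun v => (PySem.Set.ofList subseq).contains v).getD j false)
      (mem_getD_eq s subseq) s.length (le_refl _)
    rw [List.take_length, Nat.mod_self] at hal
    simp only [mem_getD_eq s subseq 0 hn] at hal
    exact hal
  rw [hA, alt_eq_findDown, bMax]
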